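-- pv_equiv track=rewrite | github.com/SHAIMOOM251283/Grokking-Algorithms | 09. DYNAMIC PROGRAMMING/multiple_knapsack.py | multiple_knapsack
-- ===== SOURCE A (Python) =====
-- def multiple_knapsack(items, capacities):
--     n = len(items)
--     m = len(capacities)
--
--     # Initialize a table to store the maximum values
--     dp = [[[0] * (max(capacities) + 1) for _ in range(n + 1)] for _ in range(m + 1)]
--
--     # Fill the table using dynamic programming
--     for i in range(1, n + 1):
--         for j in range(1, m + 1):
--             for k in range(1, max(capacities) + 1):
--                 if items[i - 1][1] <= k:
--                     dp[j][i][k] = max(dp[j][i - 1][k], dp[j - 1][i - 1][k - items[i - 1][1]] + items[i - 1][0])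
--                 else:
--                     dp[j][i][k] = dp[j][i - 1][k]
--
--     # Trace back to find the items included in the knapsacks
--     selected_items = [[] for _ in range(m)]
--     k = max(capacities)
--     for i in range(n, 0, -1):
--         for j in range(1, m + 1):
--             if dp[j][i][k] != dp[j][i - 1][k]:
--                 selected_items[j - 1].append(items[i - 1])
--                 k -= items[i - 1][1]
--
--     return dp[m][n][max(capacities)], selected_items
-- ===== SOURCE B (Python) =====
-- def multiple_knapsack(items, capacities):
--     n = len(items)
--     m = len(capacities)
--     cap = max(capacities)
--     memo = {}
--
--     # Top-down memoized evaluation of the same recurrence the table holds: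
--     # f(j, i, k) == dp[j][i][k] of the bottom-up version.
--     def f(j, i, k):
--         if i <= 0 or j <= 0 or k <= 0:
--             return 0
--         key = (j, i, k)
--         if key in memo:
--             return memo[key]
--         value, weight = items[i - 1]
--         if weight <= k:
--             res = max(f(j, i - 1, k), f(j - 1, i - 1, k - weight) + value)
--         else:
--             res = f(j, i - 1, k)
--         memo[key] = res
--         return res
--
--     # Same traceback loop, reading cell values through f instead of a table.
--     selected_items = [[] for _ in range(m)]
--     k = cap
--     for i in range(n, 0, -1):
--         for j in range(1, m + 1):
--             if f(j, i, k) != f(j, i - 1, k):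
--                 selected_items[j - 1].append(items[i - 1])
--                 k -= items[i - 1][1]
--
--     return f(m, n, cap), selected_items
-- ===== Notes on version B (the rewrite author's own statement) =====
-- stated objective: alternative
-- what changed: Replaces the bottom-up triply-nested-loop fill of a 3D dp table by top-down memoized recursion on the same recurrence (a dict cache, computing only reachable states), keeping the identical traceback loop reading cell values through the memoized function.
import Mathlib
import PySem

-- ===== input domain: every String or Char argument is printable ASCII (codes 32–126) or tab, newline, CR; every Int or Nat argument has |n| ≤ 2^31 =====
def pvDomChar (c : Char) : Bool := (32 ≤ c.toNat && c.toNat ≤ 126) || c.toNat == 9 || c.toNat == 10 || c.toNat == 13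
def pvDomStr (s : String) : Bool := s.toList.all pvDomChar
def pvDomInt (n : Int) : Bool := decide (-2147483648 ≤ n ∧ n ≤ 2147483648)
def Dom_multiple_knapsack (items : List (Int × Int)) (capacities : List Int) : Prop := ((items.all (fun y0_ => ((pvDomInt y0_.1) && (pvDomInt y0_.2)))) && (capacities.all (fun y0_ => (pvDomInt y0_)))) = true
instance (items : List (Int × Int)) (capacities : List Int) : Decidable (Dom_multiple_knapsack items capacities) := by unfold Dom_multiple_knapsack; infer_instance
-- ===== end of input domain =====

-- B replaces the bottom-up 3D dp table by top-down memoized recursion on the same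
-- recurrence (alternative decomposition, similar cost); A = B is proved on Pre_.

-- ===== PORT A =====
-- dp[j][i][k] read; Python raises IndexError when out of range (getD 0 is unreachable under Pre_)
def pyGet3 (dp : List (List (List Int))) (j i k : Int) : Int :=
  ((((PySem.List.pyGet? dp j).bind (fun p => PySem.List.pyGet? p i)).bind
      (fun r => PySem.List.pyGet? r k)).getD 0)

-- dp[j][i][k] = v; in A's fill loop the indices are the pyRange values (all ≥ 1), so toNat is exact there
def pySet3 (dp : List (List (List Int))) (j i k : Int) (v : Int) : List (List (List Int)) :=
  dp.modify j.toNat (fun p => p.modify i.toNat (fun r => r.set k.toNat v))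

-- the body of A's innermost loop
def knapStep (items : List (Int × Int)) (i j : Int)
    (dp : List (List (List Int))) (k : Int) : List (List (List Int)) :=
  let it := (PySem.List.pyGet? items (i - 1)).getD (0, 0)
  pySet3 dp j i k
    (if it.2 ≤ k then
        max (pyGet3 dp j (i - 1) k) (pyGet3 dp (j - 1) (i - 1) (k - it.2) + it.1)
      else pyGet3 dp j (i - 1) k)

-- the body of A's traceback loop (state: (selected_items, k))
def traceStepA (items : List (Int × Int)) (dp : List (List (List Int))) (i : Int)
    (st : List (List (Int × Int)) × Int) (j : Int) : List (List (Int × Int)) × Int :=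
  if pyGet3 dp j i st.2 ≠ pyGet3 dp j (i - 1) st.2 then
    let it := (PySem.List.pyGet? items (i - 1)).getD (0, 0)
    (st.1.modify (j - 1).toNat (fun l => l ++ [it]), st.2 - it.2)
  else st

def multiple_knapsack (items : List (Int × Int)) (capacities : List Int) :
    Int × (List (List (Int × Int))) :=
  let n : Int := items.length
  let m : Int := capacities.length
  match PySem.List.max? capacities (fun x => x) with
  | none => (0, [])   -- Python: max([]) raises ValueError (excluded by Pre_)
  | some cap =>
    let dp0 : List (List (List Int)) :=
      List.replicate (capacities.length + 1)
        (List.replicate (items.length + 1) (List.replicate (cap + 1).toNat (0 : Int)))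
    let dp := (PySem.List.pyRange 1 (n + 1) 1).foldl (fun dp i =>
        (PySem.List.pyRange 1 (m + 1) 1).foldl (fun dp j =>
          (PySem.List.pyRange 1 (cap + 1) 1).foldl (knapStep items i j) dp) dp) dp0
    let sel0 : List (List (Int × Int)) := List.replicate capacities.length []
    let st := (PySem.List.pyRange n 0 (-1)).foldl (fun st i =>
        (PySem.List.pyRange 1 (m + 1) 1).foldl (traceStepA items dp i) st) (sel0, cap)
    (pyGet3 dp m n cap, st.1)

-- ===== PORT B =====
-- memoized top-down evaluation of the recurrence: f(j, i, k) of Source B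
def fB (items : List (Int × Int)) (j i k : Int)
    (memo : PySem.Dict (Int × Int × Int) Int) : Int × PySem.Dict (Int × Int × Int) Int :=
  if i ≤ 0 ∨ j ≤ 0 ∨ k ≤ 0 then (0, memo)
  else
    match memo.get? (j, i, k) with
    | some v => (v, memo)
    | none =>
      let it := (PySem.List.pyGet? items (i - 1)).getD (0, 0)
      let r :=
        if it.2 ≤ k then
          let a := fB items j (i - 1) k memo
          let b := fB items (j - 1) (i - 1) (k - it.2) a.2
          (max a.1 (b.1 + it.1), b.2)
        else fB items j (i - 1) k memo
      (r.1, r.2.insert (j, i, k) r.1)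
termination_by i.toNat
decreasing_by all_goals omega

-- the body of B's traceback loop (state: (selected_items, (k, memo)))
def traceStepB (items : List (Int × Int)) (i : Int)
    (st : List (List (Int × Int)) × Int × PySem.Dict (Int × Int × Int) Int) (j : Int) :
    List (List (Int × Int)) × Int × PySem.Dict (Int × Int × Int) Int :=
  let a := fB items j i st.2.1 st.2.2
  let b := fB items j (i - 1) st.2.1 a.2
  if a.1 ≠ b.1 then
    let it := (PySem.List.pyGet? items (i - 1)).getD (0, 0)
    (st.1.modify (j - 1).toNat (fun l => l ++ [it]), st.2.1 - it.2, b.2)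
  else (st.1, st.2.1, b.2)

def multiple_knapsack_alt (items : List (Int × Int)) (capacities : List Int) :
    Int × (List (List (Int × Int))) :=
  let n : Int := items.length
  let m : Int := capacities.length
  match PySem.List.max? capacities (fun x => x) with
  | none => (0, [])   -- Python: max([]) raises ValueError (excluded by Pre_)
  | some cap =>
    let sel0 : List (List (Int × Int)) := List.replicate capacities.length []
    let st := (PySem.List.pyRange n 0 (-1)).foldl (fun st i =>
        (PySem.List.pyRange 1 (m + 1) 1).foldl (traceStepB items i) st)
        (sel0, cap, PySem.Dict.empty)
    let fin := fB items m n cap st.2.2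
    (fin.1, st.1)

-- ===== PRECONDITION & SPEC =====
-- Pre_ excludes: empty capacities (max([]) raises ValueError), a negative maximal capacity
-- (dp rows are empty and A's final/traceback read raises IndexError), and a negative item
-- weight with maximal capacity ≥ 1 (the fill reads dp[j-1][i-1][k-w] past the row end: IndexError).
def Pre_multiple_knapsack (items : List (Int × Int)) (capacities : List Int) : Prop :=
  capacities ≠ [] ∧
    0 ≤ (PySem.List.max? capacities (fun x => x)).getD 0 ∧
    ((PySem.List.max? capacities (fun x => x)).getD 0 = 0 ∨ ∀ it ∈ items, 0 ≤ it.2)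
instance (items : List (Int × Int)) (capacities : List Int) :
    Decidable (Pre_multiple_knapsack items capacities) := by
  unfold Pre_multiple_knapsack; infer_instance

def pvWitness_multiple_knapsack : (List (Int × Int)) × List Int :=
  ([(3, 2), (4, 3), (5, 4)], [5, 4])

def Spec_multiple_knapsack (items : List (Int × Int)) (capacities : List Int)
    (out : Int × (List (List (Int × Int)))) : Prop := out = multiple_knapsack_alt items capacities
instance (items : List (Int × Int)) (capacities : List Int)
    (out : Int × (List (List (Int × Int)))) : Decidable (Spec_multiple_knapsack items capacities out) := by
  unfold Spec_multiple_knapsack; infer_instance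

-- ===== CLAIM (what is proved, stated in full; the proofs are below) =====
def Claim_equal_multiple_knapsack : Prop := ∀ (items : List (Int × Int)) (capacities : List Int), Dom_multiple_knapsack items capacities → Pre_multiple_knapsack items capacities → Spec_multiple_knapsack items capacities (multiple_knapsack items capacities)


-- ===== LEMMAS AND PROOFS =====

-- the pure recurrence both programs compute: dp[j][i][k] = Fk items j i k
def Fk (items : List (Int × Int)) (j i k : Int) : Int :=
  if i ≤ 0 ∨ j ≤ 0 ∨ k ≤ 0 then 0
  else
    let it := (PySem.List.pyGet? items (i - 1)).getD (0, 0)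
    if it.2 ≤ k then
      max (Fk items j (i - 1) k) (Fk items (j - 1) (i - 1) (k - it.2) + it.1)
    else Fk items j (i - 1) k
termination_by i.toNat
decreasing_by all_goals omega

-- memo invariant of Source B: every cached value is the recurrence's value
def MInv (items : List (Int × Int)) (memo : PySem.Dict (Int × Int × Int) Int) : Prop :=
  ∀ p v, memo.get? p = some v → v = Fk items p.1 p.2.1 p.2.2

theorem fB_eval (items : List (Int × Int)) (j i k : Int)
    (memo : PySem.Dict (Int × Int × Int) Int) (h : MInv items memo) :
    (fB items j i k memo).1 = Fk items j i k ∧ MInv items (fB items j i k memo).2 := by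
  fun_induction fB items j i k memo with
  | case1 j i k memo hbase =>
    rw [Fk.eq_def]
    simpa [hbase] using h
  | case2 j i k memo hbase v hget =>
    exact ⟨h _ _ hget, h⟩
  | case3 j i k memo hbase hget it r ih2 ih1 =>
    obtain ⟨ha1, ha2⟩ := ih2 h
    rw [Fk.eq_def]
    simp only [if_neg hbase]
    simp only [r, it] at *
    by_cases hit : ((PySem.List.pyGet? items (i - 1)).getD (0, 0)).2 ≤ k
    · obtain ⟨hb1, hb2⟩ := ih1 ha2
      rw [dif_pos hit]
      refine ⟨by simp [if_pos hit, ha1, hb1], ?_⟩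
      intro p v hget'
      rw [PySem.Dict.get?_insert] at hget'
      by_cases hp : p = (j, i, k)
      · rw [if_pos hp] at hget'
        subst hp
        simp only [Option.some.injEq] at hget'
        rw [← hget']
        simp [if_pos hit, ha1, hb1, Fk.eq_def (items := items) (j := j) (i := i) (k := k),
          if_neg hbase]
      · rw [if_neg hp] at hget'
        exact hb2 _ _ hget'
    · rw [dif_neg hit]
      refine ⟨by simp [if_neg hit, ha1], ?_⟩
      intro p v hget'
      rw [PySem.Dict.get?_insert] at hget'
      by_cases hp : p = (j, i, k)
      · rw [if_pos hp] at hget'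
        subst hp
        simp only [Option.some.injEq] at hget'
        rw [← hget']
        simp [if_neg hit, ha1, Fk.eq_def (items := items) (j := j) (i := i) (k := k), if_neg hbase]
      · rw [if_neg hp] at hget'
        exact ha2 _ _ hget'

-- table shape
def Shape (dp : List (List (List Int))) (mN nN cN : Nat) : Prop :=
  dp.length = mN ∧ ∀ p ∈ dp, p.length = nN ∧ ∀ r ∈ p, r.length = cN

theorem mem_modify' {α : Type} {l : List α} {n : Nat} {f : α → α} {x : α}
    (hx : x ∈ l.modify n f) : x ∈ l ∨ ∃ y ∈ l, x = f y := by
  rw [List.mem_iff_getElem?] at hx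
  obtain ⟨t, ht⟩ := hx
  rw [List.getElem?_modify] at ht
  by_cases h : n = t
  · subst h
    cases hl : l[n]? with
    | none => simp [hl] at ht
    | some y =>
      right
      refine ⟨y, List.mem_of_getElem? hl, ?_⟩
      simp [hl] at ht
      exact ht.symm
  · left
    simp [h] at ht
    exact List.mem_of_getElem? ht

theorem Shape_pySet3 {dp : List (List (List Int))} {mN nN cN : Nat} (h : Shape dp mN nN cN)
    (j i k v : Int) : Shape (pySet3 dp j i k v) mN nN cN := by
  obtain ⟨hlen, hmem⟩ := h
  refine ⟨by simpa [pySet3] using hlen, ?_⟩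
  intro p hp
  rcases mem_modify' hp with hp | ⟨q, hq, rfl⟩
  · exact hmem p hp
  · obtain ⟨hql, hqr⟩ := hmem q hq
    refine ⟨by simpa using hql, ?_⟩
    intro r hr
    rcases mem_modify' hr with hr | ⟨s, hs, rfl⟩
    · exact hqr r hr
    · simpa using hqr s hs

theorem pyGet?_toNat {α : Type} (xs : List α) {i : Int} (h : 0 ≤ i) :
    PySem.List.pyGet? xs i = xs[i.toNat]? := by
  have := PySem.List.pyGet?_natCast xs i.toNat
  rwa [Int.toNat_of_nonneg h] at this

theorem pyGet3_set_self {dp : List (List (List Int))} {mN nN cN : Nat}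
    (h : Shape dp mN nN cN) {j i k : Int} (v : Int)
    (hj0 : 0 ≤ j) (hj : j.toNat < mN) (hi0 : 0 ≤ i) (hi : i.toNat < nN)
    (hk0 : 0 ≤ k) (hk : k.toNat < cN) :
    pyGet3 (pySet3 dp j i k v) j i k = v := by
  obtain ⟨hlen, hmem⟩ := h
  have hjlt : j.toNat < dp.length := by omega
  obtain ⟨p, hp⟩ : ∃ p, dp[j.toNat]? = some p := ⟨dp[j.toNat], List.getElem?_eq_getElem hjlt⟩
  have hpmem : p ∈ dp := List.mem_of_getElem? hp
  obtain ⟨hpl, hpr⟩ := hmem p hpmem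
  have hilt : i.toNat < p.length := by omega
  obtain ⟨r, hr⟩ : ∃ r, p[i.toNat]? = some r := ⟨p[i.toNat], List.getElem?_eq_getElem hilt⟩
  have hrmem : r ∈ p := List.mem_of_getElem? hr
  have hrl := (hpr r hrmem)
  have hklt : k.toNat < r.length := by omega
  simp [pyGet3, pySet3, pyGet?_toNat _ hj0, pyGet?_toNat _ hi0, pyGet?_toNat _ hk0,
    hp, hr, List.getElem?_set_self hklt]

theorem pyGet3_set_ne {dp : List (List (List Int))} {j i k : Int} (v : Int)
    {a b c : Int} (ha0 : 0 ≤ a) (hb0 : 0 ≤ b) (hc0 : 0 ≤ c)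
    (hj0 : 0 ≤ j) (hi0 : 0 ≤ i) (_hk0 : 0 ≤ k)
    (hne : a ≠ j ∨ b ≠ i ∨ c ≠ k) :
    pyGet3 (pySet3 dp j i k v) a b c = pyGet3 dp a b c := by
  simp only [pyGet3, pySet3, pyGet?_toNat _ ha0, pyGet?_toNat _ hb0, pyGet?_toNat _ hc0]
  by_cases haj : a = j
  · subst haj
    by_cases hbi : b = i
    · subst hbi
      have hck : k.toNat ≠ c.toNat := by omega
      cases hp : dp[a.toNat]? with
      | none => simp [hp]
      | some p =>
        cases hr : p[b.toNat]? with
        | none => simp [hp, hr]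
        | some r => simp [hp, hr, List.getElem?_set_ne hck]
    · have hib : i.toNat ≠ b.toNat := by omega
      cases hp : dp[a.toNat]? <;> simp [hp, hib]
  · have hja : j.toNat ≠ a.toNat := by omega
    simp [hja]

theorem pyGet3_replicate (mN nN cN : Nat) (a b c : Int)
    (ha0 : 0 ≤ a) (ha : a.toNat < mN) (hb0 : 0 ≤ b) (hb : b.toNat < nN)
    (hc0 : 0 ≤ c) (hc : c.toNat < cN) :
    pyGet3 (List.replicate mN (List.replicate nN (List.replicate cN (0 : Int)))) a b c = 0 := by
  simp [pyGet3, pyGet?_toNat _ ha0, pyGet?_toNat _ hb0, pyGet?_toNat _ hc0, ha, hb, hc]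

-- basic facts about the recurrence
theorem Fk_base (items : List (Int × Int)) {j i k : Int} (h : i ≤ 0 ∨ j ≤ 0 ∨ k ≤ 0) :
    Fk items j i k = 0 := by
  rw [Fk.eq_def, if_pos h]

theorem Fk_ne_facts (items : List (Int × Int)) {j i k : Int} (hk0 : 0 ≤ k)
    (h : Fk items j i k ≠ Fk items j (i - 1) k) :
    1 ≤ i ∧ 1 ≤ j ∧ 1 ≤ k ∧ ((PySem.List.pyGet? items (i - 1)).getD (0, 0)).2 ≤ k := by
  by_cases hi : i ≤ 0
  · exact absurd (by rw [Fk_base items (Or.inl hi), Fk_base items (Or.inl (by omega))]) h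
  by_cases hj : j ≤ 0
  · exact absurd (by rw [Fk_base items (Or.inr (Or.inl hj)),
      Fk_base items (Or.inr (Or.inl hj))]) h
  by_cases hk : k ≤ 0
  · exact absurd (by rw [Fk_base items (Or.inr (Or.inr hk)),
      Fk_base items (Or.inr (Or.inr hk))]) h
  refine ⟨by omega, by omega, by omega, ?_⟩
  by_contra hw
  refine h ?_
  rw [Fk.eq_def (items := items) (j := j) (i := i) (k := k), if_neg (by omega)]
  simp only [if_neg hw]

theorem item_mem (items : List (Int × Int)) {i : Int} (h1 : 1 ≤ i)
    (h2 : i ≤ (items.length : Int)) :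
    (PySem.List.pyGet? items (i - 1)).getD (0, 0) ∈ items := by
  rw [pyGet?_toNat _ (by omega)]
  have hlt : (i - 1).toNat < items.length := by omega
  rw [List.getElem?_eq_getElem hlt]
  exact List.getElem_mem hlt

-- the innermost (k) fill loop computes Fk at row (j, i) and touches nothing else
theorem kfold_fill (items : List (Int × Int)) (mN nN : Nat) (cap : Int) (hcap : 0 ≤ cap)
    (hw : ∀ it ∈ items, 0 ≤ it.2) (hnN : nN = items.length)
    (i j : Int) (hi1 : 1 ≤ i) (hi2 : i ≤ (nN : Int)) (hj1 : 1 ≤ j) (hj2 : j ≤ (mN : Int)) :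
    ∀ (fuel : Nat) (lo : Int), (cap + 1 - lo).toNat ≤ fuel → 1 ≤ lo →
    ∀ dp, Shape dp (mN + 1) (nN + 1) (cap.toNat + 1) →
      (∀ a c : Int, 0 ≤ a → a ≤ (mN : Int) → 0 ≤ c → c ≤ cap →
        pyGet3 dp a (i - 1) c = Fk items a (i - 1) c) →
      Shape ((PySem.List.pyRange lo (cap + 1) 1).foldl (knapStep items i j) dp)
          (mN + 1) (nN + 1) (cap.toNat + 1) ∧
      (∀ a b c : Int, 0 ≤ a → 0 ≤ b → 0 ≤ c → (a ≠ j ∨ b ≠ i ∨ c < lo) →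
        pyGet3 ((PySem.List.pyRange lo (cap + 1) 1).foldl (knapStep items i j) dp) a b c =
          pyGet3 dp a b c) ∧
      (∀ c : Int, lo ≤ c → c ≤ cap →
        pyGet3 ((PySem.List.pyRange lo (cap + 1) 1).foldl (knapStep items i j) dp) j i c =
          Fk items j i c) := by
  intro fuel
  induction fuel with
  | zero =>
    intro lo hfuel hlo dp hsh hprev
    rw [PySem.List.pyRange_one_eq_nil (by omega)]
    exact ⟨hsh, fun a b c _ _ _ _ => rfl, fun c hc1 hc2 => absurd hc1 (by omega)⟩
  | succ f ihf =>
    intro lo hfuel hlo dp hsh hprev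
    by_cases hend : cap + 1 ≤ lo
    · rw [PySem.List.pyRange_one_eq_nil (by omega)]
      exact ⟨hsh, fun a b c _ _ _ _ => rfl, fun c hc1 hc2 => absurd hc1 (by omega)⟩
    · rw [PySem.List.pyRange_one_cons (by omega : lo < cap + 1), List.foldl_cons]
      have hit0 : 0 ≤ ((PySem.List.pyGet? items (i - 1)).getD (0, 0)).2 :=
        hw _ (item_mem items hi1 (by omega))
      have hsh1 : Shape (knapStep items i j dp lo) (mN + 1) (nN + 1) (cap.toNat + 1) := by
        unfold knapStep; exact Shape_pySet3 hsh _ _ _ _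
      have hunch1 : ∀ a b c : Int, 0 ≤ a → 0 ≤ b → 0 ≤ c → (a ≠ j ∨ b ≠ i ∨ c ≠ lo) →
          pyGet3 (knapStep items i j dp lo) a b c = pyGet3 dp a b c := by
        intro a b c ha hb hc hcond
        unfold knapStep
        exact pyGet3_set_ne _ ha hb hc (by omega) (by omega) (by omega) hcond
      have hval : pyGet3 (knapStep items i j dp lo) j i lo = Fk items j i lo := by
        unfold knapStep
        rw [pyGet3_set_self hsh _ (by omega) (by omega) (by omega) (by omega) (by omega)
          (by omega)]
        by_cases hit : ((PySem.List.pyGet? items (i - 1)).getD (0, 0)).2 ≤ lo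
        · rw [if_pos hit, hprev j lo (by omega) (by omega) (by omega) (by omega),
            hprev (j - 1) (lo - ((PySem.List.pyGet? items (i - 1)).getD (0, 0)).2)
              (by omega) (by omega) (by omega) (by omega)]
          rw [Fk.eq_def (items := items) (j := j) (i := i) (k := lo), if_neg (by omega)]
          simp only [if_pos hit]
        · rw [if_neg hit, hprev j lo (by omega) (by omega) (by omega) (by omega)]
          rw [Fk.eq_def (items := items) (j := j) (i := i) (k := lo), if_neg (by omega)]
          simp only [if_neg hit]
      have hprev1 : ∀ a c : Int, 0 ≤ a → a ≤ (mN : Int) → 0 ≤ c → c ≤ cap →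
          pyGet3 (knapStep items i j dp lo) a (i - 1) c = Fk items a (i - 1) c := by
        intro a c ha1 ha2 hc1 hc2
        rw [hunch1 a (i - 1) c (by omega) (by omega) (by omega) (Or.inr (Or.inl (by omega)))]
        exact hprev a c ha1 ha2 hc1 hc2
      obtain ⟨hshF, hunchF, hfillF⟩ :=
        ihf (lo + 1) (by omega) (by omega) (knapStep items i j dp lo) hsh1 hprev1
      refine ⟨hshF, ?_, ?_⟩
      · intro a b c ha hb hc hcond
        rw [hunchF a b c ha hb hc
          (hcond.imp id (fun h2 => h2.imp id (fun h3 => by omega)))]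
        exact hunch1 a b c ha hb hc
          (hcond.imp id (fun h2 => h2.imp id (fun h3 => by omega)))
      · intro c hc1 hc2
        by_cases hceq : c = lo
        · subst hceq
          rw [hunchF j i c (by omega) (by omega) (by omega) (Or.inr (Or.inr (by omega)))]
          exact hval
        · exact hfillF c (by omega) hc2

-- the middle (j) fill loop fills layer i and touches nothing else
theorem jfold_fill (items : List (Int × Int)) (mN nN : Nat) (cap : Int) (hcap : 0 ≤ cap)
    (hw : ∀ it ∈ items, 0 ≤ it.2) (hnN : nN = items.length)
    (i : Int) (hi1 : 1 ≤ i) (hi2 : i ≤ (nN : Int)) :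
    ∀ (fuel : Nat) (lo : Int), ((mN : Int) + 1 - lo).toNat ≤ fuel → 1 ≤ lo →
    ∀ dp, Shape dp (mN + 1) (nN + 1) (cap.toNat + 1) →
      (∀ a c : Int, 0 ≤ a → a ≤ (mN : Int) → 0 ≤ c → c ≤ cap →
        pyGet3 dp a (i - 1) c = Fk items a (i - 1) c) →
      Shape ((PySem.List.pyRange lo ((mN : Int) + 1) 1).foldl
          (fun dp j => (PySem.List.pyRange 1 (cap + 1) 1).foldl (knapStep items i j) dp) dp)
          (mN + 1) (nN + 1) (cap.toNat + 1) ∧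
      (∀ a b c : Int, 0 ≤ a → 0 ≤ b → 0 ≤ c → (a < lo ∨ b ≠ i ∨ c < 1) →
        pyGet3 ((PySem.List.pyRange lo ((mN : Int) + 1) 1).foldl
          (fun dp j => (PySem.List.pyRange 1 (cap + 1) 1).foldl (knapStep items i j) dp) dp)
          a b c = pyGet3 dp a b c) ∧
      (∀ a c : Int, lo ≤ a → a ≤ (mN : Int) → 1 ≤ c → c ≤ cap →
        pyGet3 ((PySem.List.pyRange lo ((mN : Int) + 1) 1).foldl
          (fun dp j => (PySem.List.pyRange 1 (cap + 1) 1).foldl (knapStep items i j) dp) dp)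
          a i c = Fk items a i c) := by
  intro fuel
  induction fuel with
  | zero =>
    intro lo hfuel hlo dp hsh hprev
    rw [PySem.List.pyRange_one_eq_nil (show (mN : Int) + 1 ≤ lo by omega)]
    exact ⟨hsh, fun a b c _ _ _ _ => rfl, fun a c ha1 ha2 _ _ => absurd ha1 (by omega)⟩
  | succ f ihf =>
    intro lo hfuel hlo dp hsh hprev
    by_cases hend : (mN : Int) + 1 ≤ lo
    · rw [PySem.List.pyRange_one_eq_nil (show (mN : Int) + 1 ≤ lo by omega)]
      exact ⟨hsh, fun a b c _ _ _ _ => rfl, fun a c ha1 ha2 _ _ => absurd ha1 (by omega)⟩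
    · rw [PySem.List.pyRange_one_cons (show lo < (mN : Int) + 1 by omega), List.foldl_cons]
      obtain ⟨hsh1, hunch1, hfill1⟩ := kfold_fill items mN nN cap hcap hw hnN i lo hi1 hi2
        hlo (by omega) (cap + 1 - 1).toNat 1 (by omega) (by omega) dp hsh hprev
      have hprev1 : ∀ a c : Int, 0 ≤ a → a ≤ (mN : Int) → 0 ≤ c → c ≤ cap →
          pyGet3 ((PySem.List.pyRange 1 (cap + 1) 1).foldl (knapStep items i lo) dp)
            a (i - 1) c = Fk items a (i - 1) c := by
        intro a c ha1 ha2 hc1 hc2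
        rw [hunch1 a (i - 1) c (by omega) (by omega) (by omega) (Or.inr (Or.inl (by omega)))]
        exact hprev a c ha1 ha2 hc1 hc2
      obtain ⟨hshF, hunchF, hfillF⟩ := ihf (lo + 1) (by omega) (by omega)
        ((PySem.List.pyRange 1 (cap + 1) 1).foldl (knapStep items i lo) dp) hsh1 hprev1
      refine ⟨hshF, ?_, ?_⟩
      · intro a b c ha hb hc hcond
        rw [hunchF a b c ha hb hc (hcond.imp (fun h2 => by omega) id)]
        exact hunch1 a b c ha hb hc (hcond.imp (fun h2 => by omega) id)
      · intro a c ha1 ha2 hc1 hc2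
        by_cases haeq : a = lo
        · subst haeq
          rw [hunchF a i c (by omega) (by omega) (by omega) (Or.inl (by omega))]
          exact hfill1 c (by omega) hc2
        · exact hfillF a c (by omega) ha2 hc1 hc2

-- the outer (i) fill loop: the finished table holds Fk everywhere in range
theorem ifold_fill (items : List (Int × Int)) (mN nN : Nat) (cap : Int) (hcap : 0 ≤ cap)
    (hw : ∀ it ∈ items, 0 ≤ it.2) (hnN : nN = items.length) :
    ∀ (fuel : Nat) (lo : Int), ((nN : Int) + 1 - lo).toNat ≤ fuel → 1 ≤ lo →
    ∀ dp, Shape dp (mN + 1) (nN + 1) (cap.toNat + 1) →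
      (∀ a b c : Int, 0 ≤ a → a ≤ (mN : Int) → 0 ≤ b → b ≤ (nN : Int) → 0 ≤ c → c ≤ cap →
        pyGet3 dp a b c = if b < lo then Fk items a b c else 0) →
      (∀ a b c : Int, 0 ≤ a → a ≤ (mN : Int) → 0 ≤ b → b ≤ (nN : Int) → 0 ≤ c → c ≤ cap →
        pyGet3 ((PySem.List.pyRange lo ((nN : Int) + 1) 1).foldl
          (fun dp i => (PySem.List.pyRange 1 ((mN : Int) + 1) 1).foldl
            (fun dp j => (PySem.List.pyRange 1 (cap + 1) 1).foldl (knapStep items i j) dp) dp)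
          dp) a b c = Fk items a b c) := by
  intro fuel
  induction fuel with
  | zero =>
    intro lo hfuel hlo dp hsh hlow a b c ha1 ha2 hb1 hb2 hc1 hc2
    rw [PySem.List.pyRange_one_eq_nil (show (nN : Int) + 1 ≤ lo by omega), List.foldl_nil]
    rw [hlow a b c ha1 ha2 hb1 hb2 hc1 hc2, if_pos (by omega)]
  | succ f ihf =>
    intro lo hfuel hlo dp hsh hlow a b c ha1 ha2 hb1 hb2 hc1 hc2
    by_cases hend : (nN : Int) + 1 ≤ lo
    · rw [PySem.List.pyRange_one_eq_nil (show (nN : Int) + 1 ≤ lo by omega), List.foldl_nil]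
      rw [hlow a b c ha1 ha2 hb1 hb2 hc1 hc2, if_pos (by omega)]
    · rw [PySem.List.pyRange_one_cons (show lo < (nN : Int) + 1 by omega), List.foldl_cons]
      have hprev : ∀ a c : Int, 0 ≤ a → a ≤ (mN : Int) → 0 ≤ c → c ≤ cap →
          pyGet3 dp a (lo - 1) c = Fk items a (lo - 1) c := by
        intro a c ha1 ha2 hc1 hc2
        rw [hlow a (lo - 1) c ha1 ha2 (by omega) (by omega) hc1 hc2, if_pos (by omega)]
      obtain ⟨hsh1, hunch1, hfill1⟩ := jfold_fill items mN nN cap hcap hw hnN lo hlo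
        (by omega) ((mN : Int) + 1 - 1).toNat 1 (by omega) (by omega) dp hsh hprev
      have hlow1 : ∀ a b c : Int, 0 ≤ a → a ≤ (mN : Int) → 0 ≤ b → b ≤ (nN : Int) →
          0 ≤ c → c ≤ cap →
          pyGet3 ((PySem.List.pyRange 1 ((mN : Int) + 1) 1).foldl
            (fun dp j => (PySem.List.pyRange 1 (cap + 1) 1).foldl (knapStep items lo j) dp) dp)
            a b c = if b < lo + 1 then Fk items a b c else 0 := by
        intro a b c ha1 ha2 hb1 hb2 hc1 hc2
        by_cases hbeq : b = lo
        · subst hbeq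
          by_cases ha0 : a < 1
          · rw [hunch1 a b c (by omega) (by omega) (by omega) (Or.inl (by omega)),
              hlow a b c (by omega) ha2 hb1 hb2 hc1 hc2, if_neg (by omega), if_pos (by omega),
              Fk_base items (Or.inr (Or.inl (by omega)))]
          · by_cases hc0 : c < 1
            · rw [hunch1 a b c (by omega) (by omega) (by omega) (Or.inr (Or.inr (by omega))),
                hlow a b c (by omega) ha2 hb1 hb2 hc1 hc2, if_neg (by omega),
                if_pos (by omega), Fk_base items (Or.inr (Or.inr (by omega)))]
            · rw [hfill1 a c (by omega) ha2 (by omega) hc2, if_pos (by omega)]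
        · rw [hunch1 a b c (by omega) (by omega) (by omega) (Or.inr (Or.inl (by omega))),
            hlow a b c (by omega) ha2 hb1 hb2 hc1 hc2]
          by_cases hblt : b < lo
          · rw [if_pos (by omega), if_pos (by omega)]
          · rw [if_neg (by omega), if_neg (by omega)]
      exact ihf (lo + 1) (by omega) (by omega) _ hsh1 hlow1 a b c ha1 ha2 hb1 hb2 hc1 hc2

-- the traceback loops of A and B walk in lockstep: same selections, same running k
theorem tr_inner (items : List (Int × Int)) (dp : List (List (List Int))) (mN nN : Nat)
    (cap : Int) (_hcap : 0 ≤ cap) (hnN : nN = items.length)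
    (hdisj : cap = 0 ∨ ∀ it ∈ items, 0 ≤ it.2)
    (hfill : ∀ a b c : Int, 0 ≤ a → a ≤ (mN : Int) → 0 ≤ b → b ≤ (nN : Int) → 0 ≤ c →
      c ≤ cap → pyGet3 dp a b c = Fk items a b c)
    (i : Int) (hi1 : 1 ≤ i) (hi2 : i ≤ (nN : Int)) :
    ∀ (js : List Int), (∀ j ∈ js, 1 ≤ j ∧ j ≤ (mN : Int)) →
    ∀ (sel : List (List (Int × Int))) (k : Int) (memo : PySem.Dict (Int × Int × Int) Int),
      0 ≤ k → k ≤ cap → MInv items memo →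
      (js.foldl (traceStepB items i) (sel, k, memo)).1 =
        (js.foldl (traceStepA items dp i) (sel, k)).1 ∧
      (js.foldl (traceStepB items i) (sel, k, memo)).2.1 =
        (js.foldl (traceStepA items dp i) (sel, k)).2 ∧
      0 ≤ (js.foldl (traceStepA items dp i) (sel, k)).2 ∧
      (js.foldl (traceStepA items dp i) (sel, k)).2 ≤ cap ∧
      MInv items (js.foldl (traceStepB items i) (sel, k, memo)).2.2 := by
  intro js
  induction js with
  | nil => exact fun _ sel k memo hk1 hk2 hm => ⟨rfl, rfl, hk1, hk2, hm⟩
  | cons j js ih =>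
    intro hjs sel k memo hk1 hk2 hm
    obtain ⟨hj1, hj2⟩ := hjs j List.mem_cons_self
    simp only [List.foldl_cons]
    obtain ⟨ha1, ha2⟩ := fB_eval items j i k memo hm
    obtain ⟨hb1, hb2⟩ := fB_eval items j (i - 1) k (fB items j i k memo).2 ha2
    have hgi : pyGet3 dp j i k = Fk items j i k :=
      hfill j i k (by omega) (by omega) (by omega) (by omega) (by omega) (by omega)
    have hgi' : pyGet3 dp j (i - 1) k = Fk items j (i - 1) k :=
      hfill j (i - 1) k (by omega) (by omega) (by omega) (by omega) (by omega) (by omega)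
    by_cases hc : Fk items j i k ≠ Fk items j (i - 1) k
    · have hA : traceStepA items dp i (sel, k) j =
          ((sel.modify (j - 1).toNat
              (fun l => l ++ [(PySem.List.pyGet? items (i - 1)).getD (0, 0)])),
            k - ((PySem.List.pyGet? items (i - 1)).getD (0, 0)).2) := by
        unfold traceStepA
        rw [if_pos (by simpa [hgi, hgi'] using hc)]
      have hB : traceStepB items i (sel, k, memo) j =
          ((sel.modify (j - 1).toNat
              (fun l => l ++ [(PySem.List.pyGet? items (i - 1)).getD (0, 0)])),
            k - ((PySem.List.pyGet? items (i - 1)).getD (0, 0)).2,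
            (fB items j (i - 1) k (fB items j i k memo).2).2) := by
        unfold traceStepB
        rw [if_pos (by simpa [ha1, hb1] using hc)]
      rw [hA, hB]
      obtain ⟨hik, hjk, hkk, hwk⟩ := Fk_ne_facts items hk1 hc
      have hw' : ∀ it ∈ items, 0 ≤ it.2 := by
        rcases hdisj with h0 | h0
        · omega
        · exact h0
      have hit0 : 0 ≤ ((PySem.List.pyGet? items (i - 1)).getD (0, 0)).2 :=
        hw' _ (item_mem items hi1 (by omega))
      exact ih (fun x hx => hjs x (List.mem_cons_of_mem _ hx)) _ _ _ (by omega) (by omega) hb2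
    · have hA : traceStepA items dp i (sel, k) j = (sel, k) := by
        unfold traceStepA
        rw [if_neg (by simpa [hgi, hgi'] using hc)]
      have hB : traceStepB items i (sel, k, memo) j =
          (sel, k, (fB items j (i - 1) k (fB items j i k memo).2).2) := by
        unfold traceStepB
        rw [if_neg (by simpa [ha1, hb1] using hc)]
      rw [hA, hB]
      exact ih (fun x hx => hjs x (List.mem_cons_of_mem _ hx)) _ _ _ hk1 hk2 hb2

theorem tr_outer (items : List (Int × Int)) (dp : List (List (List Int))) (mN nN : Nat)
    (cap : Int) (hcap : 0 ≤ cap) (hnN : nN = items.length)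
    (hdisj : cap = 0 ∨ ∀ it ∈ items, 0 ≤ it.2)
    (hfill : ∀ a b c : Int, 0 ≤ a → a ≤ (mN : Int) → 0 ≤ b → b ≤ (nN : Int) → 0 ≤ c →
      c ≤ cap → pyGet3 dp a b c = Fk items a b c) :
    ∀ (is : List Int), (∀ i ∈ is, 1 ≤ i ∧ i ≤ (nN : Int)) →
    ∀ (sel : List (List (Int × Int))) (k : Int) (memo : PySem.Dict (Int × Int × Int) Int),
      0 ≤ k → k ≤ cap → MInv items memo →
      (is.foldl (fun st i =>
          (PySem.List.pyRange 1 ((mN : Int) + 1) 1).foldl (traceStepB items i) st)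
        (sel, k, memo)).1 =
        (is.foldl (fun st i =>
          (PySem.List.pyRange 1 ((mN : Int) + 1) 1).foldl (traceStepA items dp i) st)
        (sel, k)).1 ∧
      MInv items (is.foldl (fun st i =>
          (PySem.List.pyRange 1 ((mN : Int) + 1) 1).foldl (traceStepB items i) st)
        (sel, k, memo)).2.2 := by
  intro is
  induction is with
  | nil => exact fun _ sel k memo hk1 hk2 hm => ⟨rfl, hm⟩
  | cons i is ih =>
    intro his sel k memo hk1 hk2 hm
    obtain ⟨hi1, hi2⟩ := his i List.mem_cons_self
    simp only [List.foldl_cons]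
    obtain ⟨hs1, hs2, hk1', hk2', hm'⟩ := tr_inner items dp mN nN cap hcap hnN hdisj hfill
      i hi1 hi2 (PySem.List.pyRange 1 ((mN : Int) + 1) 1)
      (fun j hj => by
        rw [PySem.List.mem_pyRange_one] at hj
        exact ⟨hj.1, by omega⟩)
      sel k memo hk1 hk2 hm
    have hpair : ((PySem.List.pyRange 1 ((mN : Int) + 1) 1).foldl (traceStepB items i)
        (sel, k, memo)) =
        (((PySem.List.pyRange 1 ((mN : Int) + 1) 1).foldl (traceStepA items dp i)
            (sel, k)).1,
          ((PySem.List.pyRange 1 ((mN : Int) + 1) 1).foldl (traceStepA items dp i)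
            (sel, k)).2,
          ((PySem.List.pyRange 1 ((mN : Int) + 1) 1).foldl (traceStepB items i)
            (sel, k, memo)).2.2) := by
      refine Prod.ext hs1 (Prod.ext ?_ rfl)
      simpa using hs2
    rw [hpair]
    exact ih (fun x hx => his x (List.mem_cons_of_mem _ hx)) _ _ _ hk1' hk2' hm'

-- ===== VERDICT (by name: the statement is the Claim_ definition above) =====
theorem multiple_knapsack_spec : Claim_equal_multiple_knapsack := by
  intro items capacities _ hpre
  obtain ⟨hne, hnn, hdisj⟩ := hpre
  unfold Spec_multiple_knapsack
  cases hmax : PySem.List.max? capacities (fun x => x) with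
  | none => exact absurd ((PySem.List.max?_eq_none_iff capacities _).mp hmax) hne
  | some cap =>
    rw [hmax] at hnn hdisj
    simp only [Option.getD_some] at hnn hdisj
    unfold multiple_knapsack multiple_knapsack_alt
    rw [hmax]
    simp only []
    -- the finished table holds the recurrence everywhere in range
    have hto : (cap + 1).toNat = cap.toNat + 1 := by omega
    have hsh0 : Shape (List.replicate (capacities.length + 1)
        (List.replicate (items.length + 1) (List.replicate (cap + 1).toNat (0 : Int))))
        (capacities.length + 1) (items.length + 1) (cap.toNat + 1) := by
      refine ⟨List.length_replicate, ?_⟩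
      intro p hp
      rw [List.eq_of_mem_replicate hp]
      refine ⟨List.length_replicate, ?_⟩
      intro r hr
      rw [List.eq_of_mem_replicate hr, List.length_replicate, hto]
    have hfill : ∀ a b c : Int, 0 ≤ a → a ≤ (capacities.length : Int) → 0 ≤ b →
        b ≤ (items.length : Int) → 0 ≤ c → c ≤ cap →
        pyGet3 ((PySem.List.pyRange 1 ((items.length : Int) + 1) 1).foldl (fun dp i =>
          (PySem.List.pyRange 1 ((capacities.length : Int) + 1) 1).foldl (fun dp j =>
            (PySem.List.pyRange 1 (cap + 1) 1).foldl (knapStep items i j) dp) dp)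
          (List.replicate (capacities.length + 1)
            (List.replicate (items.length + 1) (List.replicate (cap + 1).toNat (0 : Int)))))
          a b c = Fk items a b c := by
      rcases hdisj with h0 | hw
      · -- max capacity 0: the k-ranges are empty, the table never changes, and Fk is 0
        subst h0
        have hnil : PySem.List.pyRange 1 (0 + 1) 1 = [] :=
          PySem.List.pyRange_one_eq_nil (by omega)
        intro a b c ha1 ha2 hb1 hb2 hc1 hc2
        have hc0 : c = 0 := by omega
        subst hc0
        have hid : ∀ (l : List Int) (dp : List (List (List Int))),
            l.foldl (fun dp i =>
              (PySem.List.pyRange 1 ((capacities.length : Int) + 1) 1).foldl (fun dp j =>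
                (PySem.List.pyRange 1 (0 + 1) 1).foldl (knapStep items i j) dp) dp) dp = dp := by
          intro l
          induction l with
          | nil => intro dp; rfl
          | cons x l ihl =>
            intro dp
            rw [List.foldl_cons, hnil]
            have : (PySem.List.pyRange 1 ((capacities.length : Int) + 1) 1).foldl
                (fun dp j => List.foldl (knapStep items x j) dp []) dp = dp := by
              generalize (PySem.List.pyRange 1 ((capacities.length : Int) + 1) 1) = l2
              induction l2 generalizing dp with
              | nil => rfl
              | cons y l2 ihl2 => rw [List.foldl_cons]; exact ihl2 _
            rw [this]
            exact ihl dp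
        rw [hid]
        rw [pyGet3_replicate _ _ _ a b 0 (by omega) (by omega) (by omega) (by omega)
          (by omega) (by omega), Fk_base items (Or.inr (Or.inr (by omega)))]
      · -- nonnegative weights: the three nested fill loops compute Fk
        intro a b c ha1 ha2 hb1 hb2 hc1 hc2
        refine ifold_fill items capacities.length items.length cap hnn hw rfl
          ((items.length : Int) + 1 - 1).toNat 1 (by omega) (by omega) _ hsh0 ?_
          a b c ha1 ha2 hb1 hb2 hc1 hc2
        intro a b c ha1 ha2 hb1 hb2 hc1 hc2
        rw [pyGet3_replicate _ _ _ a b c (by omega) (by omega) (by omega) (by omega)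
          (by omega) (by omega)]
        split
        · next h => rw [Fk_base items (Or.inl (by omega))]
        · rfl
    -- the traceback loops agree and the final values agree
    obtain ⟨hs1, hm⟩ := tr_outer items _ capacities.length items.length cap hnn rfl hdisj hfill
      (PySem.List.pyRange (items.length : Int) 0 (-1))
      (fun i hi => by
        rw [PySem.List.mem_pyRange_neg_one] at hi
        exact ⟨by omega, hi.2⟩)
      (List.replicate capacities.length []) cap PySem.Dict.empty (by omega) le_rfl
      (fun p v h => by rw [PySem.Dict.get?_empty] at h; exact absurd h (by simp))
    refine Prod.ext ?_ hs1.symm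
    simp only []
    rw [(fB_eval items (capacities.length : Int) (items.length : Int) cap _ hm).1]
    rw [hfill (capacities.length : Int) (items.length : Int) cap (by omega) le_rfl
      (by omega) le_rfl (by omega) le_rfl]
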